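-- pv_equiv track=rewrite | github.com/MetroRobots/ros_rocks | ros_rocks.py | can_split_versions_with_combo
-- ===== SOURCE A (Python) =====
-- import collections
--
-- def can_split_versions_with_combo(pkg_status, combo):
--     """
--     Group packages statuses by keys specified in combo.
--     Determine if the different versions of the package can be evenly split
--     across different values of the keys.
--     For instance, if all the builds on main are version 0.1
--     and all the versions on build/test are 0.2,
--     that's an even split, so if the combo was just ['repo'], it would return
--     {0.1: [main], 0.2: [build/test]}
--     """
--     version_lookup = {}
--     version_mapping = collections.defaultdict(set)
--     for version, keys in pkg_status.items():
--         if version is None: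
--             version = 'missing'
--         for key in keys:
--             new_key = tuple([key[c] for c in combo])
--             if new_key in version_lookup:
--                 if version_lookup[new_key] != version:
--                     return None
--             else:
--                 version_lookup[new_key] = version
--             version_mapping[version].add('/'.join(new_key))
--     return version_mapping
-- ===== SOURCE B (Python) =====
-- import collections
--
-- def can_split_versions_with_combo(pkg_status, combo):
--     # Flatten everything into one (new_key, version) pair list.
--     pairs = [(tuple(key[c] for c in combo), 'missing' if version is None else version)
--              for version, keys in pkg_status.items() for key in keys]
--     # An uneven split means some new_key carries two different versions,
--     # i.e. there are fewer distinct new_keys than distinct (new_key, version) pairs.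
--     if len({nk for nk, _ in pairs}) != len(set(pairs)):
--         return None
--     version_mapping = collections.defaultdict(set)
--     for nk, version in pairs:
--         version_mapping[version].add('/'.join(nk))
--     return version_mapping
-- ===== Notes on version B (the rewrite author's own statement) =====
-- stated objective: alternative
-- what changed: A detects an uneven split incrementally with a new_key->version lookup dict maintained alongside the output inside one nested loop; B has no lookup dict at all: it flattens the input into a (new_key, version) pair list, decides splittability globally by comparing the count of distinct new_keys with the count of distinct pairs, and only then groups the pairs into the version->keys mapping.
-- outside the precondition, e.g. on can_split_versions_with_combo({None: [{}]}, ['repo']): A raises KeyError, B raises KeyError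
import Mathlib
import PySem

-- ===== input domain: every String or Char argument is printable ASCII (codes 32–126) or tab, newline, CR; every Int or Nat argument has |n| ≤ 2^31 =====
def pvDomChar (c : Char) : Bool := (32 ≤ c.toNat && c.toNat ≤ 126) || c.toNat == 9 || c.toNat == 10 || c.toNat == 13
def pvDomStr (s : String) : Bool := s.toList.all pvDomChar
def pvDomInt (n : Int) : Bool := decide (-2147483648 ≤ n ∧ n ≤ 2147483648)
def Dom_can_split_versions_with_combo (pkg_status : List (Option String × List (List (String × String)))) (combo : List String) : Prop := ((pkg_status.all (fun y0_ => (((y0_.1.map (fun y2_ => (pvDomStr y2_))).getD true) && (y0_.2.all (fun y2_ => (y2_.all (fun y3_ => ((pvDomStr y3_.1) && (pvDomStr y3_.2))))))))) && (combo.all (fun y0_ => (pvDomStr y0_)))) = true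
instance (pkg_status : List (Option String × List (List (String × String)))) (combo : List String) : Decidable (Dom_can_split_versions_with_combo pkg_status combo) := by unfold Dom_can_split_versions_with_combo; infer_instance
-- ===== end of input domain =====

-- B drops A's incremental conflict-detecting lookup dict entirely: it flattens the input into one
-- (new_key, version) pair list, decides the even split globally by comparing the number of distinct
-- new_keys with the number of distinct pairs, and only then groups; objective: alternative algorithm.

-- ===== PORT A =====
-- key[c] for c in combo; Pre_ guarantees every c is a key of `key`, so the "" default never shows
def pvNewKeyA (key : List (String × String)) (combo : List String) : List String :=
  combo.map (fun c => (PySem.Dict.mk key).getD c "")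

def pvJoinA (nk : List String) : String := PySem.Str.join "/" nk

-- the inner `for key in keys` loop; state = (version_lookup, version_mapping); none = `return None`
def pvInnerA (version : String) (combo : List String) :
    List (List (String × String)) →
    PySem.Dict (List String) String → PySem.Dict String (List String) →
    Option (PySem.Dict (List String) String × PySem.Dict String (List String))
  | [], lookup, mapping => some (lookup, mapping)
  | key :: rest, lookup, mapping =>
    let nk := pvNewKeyA key combo
    match lookup.get? nk with
    | some v =>
      if v ≠ version then none
      else pvInnerA version combo rest lookup
        (mapping.modify version [] (fun s => PySem.Set.add s (pvJoinA nk)))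
    | none =>
      pvInnerA version combo rest (lookup.insert nk version)
        (mapping.modify version [] (fun s => PySem.Set.add s (pvJoinA nk)))

-- the outer `for version, keys in pkg_status.items()` loop
def pvOuterA (combo : List String) :
    List (Option String × List (List (String × String))) →
    PySem.Dict (List String) String → PySem.Dict String (List String) →
    Option (PySem.Dict String (List String))
  | [], _, mapping => some mapping
  | (ver?, keys) :: rest, lookup, mapping =>
    let version := match ver? with | none => "missing" | some v => v
    match pvInnerA version combo keys lookup mapping with
    | none => none
    | some st => pvOuterA combo rest st.1 st.2

def can_split_versions_with_combo (pkg_status : List (Option String × List (List (String × String)))) (combo : List String) : Option (List (String × List String)) :=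
  (pvOuterA combo pkg_status PySem.Dict.empty PySem.Dict.empty).map PySem.Dict.items

-- ===== PORT B =====
-- the flattening comprehension: one (new_key, version) pair per (version, keys, key) triple
def pvPairsB (pkg_status : List (Option String × List (List (String × String)))) (combo : List String) : List (List String × String) :=
  pkg_status.flatMap (fun p =>
    p.2.map (fun key =>
      (combo.map (fun c => (PySem.Dict.mk key).getD c ""),
       match p.1 with | none => "missing" | some v => v)))

-- the grouping loop: version_mapping[version].add('/'.join(nk)) over the pair list
def pvGroupB (pairs : List (List String × String)) : PySem.Dict String (List String) :=
  pairs.foldl (fun m p => m.modify p.2 [] (fun s => PySem.Set.add s (PySem.Str.join "/" p.1)))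
    PySem.Dict.empty

def can_split_versions_with_combo_alt (pkg_status : List (Option String × List (List (String × String)))) (combo : List String) : Option (List (String × List String)) :=
  let pairs := pvPairsB pkg_status combo
  if (PySem.Set.ofList (pairs.map Prod.fst)).length ≠ (PySem.Set.ofList pairs).length then
    none
  else
    some (pvGroupB pairs).items

-- ===== PRECONDITION & SPEC =====
-- Pre_ excludes (a) inner key dicts missing some combo field, on which Python A raises KeyError, and
-- (b) association lists with duplicate outer versions or duplicate inner key fields, which are not
-- representable as the Python dicts A receives. (The proved A = B equality happens to hold on all
-- inputs, so the proofs below do not consume Pre_; Pre_ marks where the ports are faithful to Python.)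
def Pre_can_split_versions_with_combo (pkg_status : List (Option String × List (List (String × String)))) (combo : List String) : Prop :=
  (pkg_status.map (·.1)).Nodup ∧
  ∀ p ∈ pkg_status, ∀ key ∈ p.2,
    (key.map (·.1)).Nodup ∧ ∀ c ∈ combo, (PySem.Dict.mk key).contains c = true
instance (pkg_status : List (Option String × List (List (String × String)))) (combo : List String) : Decidable (Pre_can_split_versions_with_combo pkg_status combo) := by unfold Pre_can_split_versions_with_combo; infer_instance

def pvWitness_can_split_versions_with_combo : (List (Option String × List (List (String × String)))) × List String :=
  ([(some "1", [[("repo", "main")]]), (none, [[("repo", "dev")]])], ["repo"])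

def Spec_can_split_versions_with_combo (pkg_status : List (Option String × List (List (String × String)))) (combo : List String) (out : Option (List (String × List String))) : Prop := out = can_split_versions_with_combo_alt pkg_status combo
instance (pkg_status : List (Option String × List (List (String × String)))) (combo : List String) (out : Option (List (String × List String))) : Decidable (Spec_can_split_versions_with_combo pkg_status combo out) := by unfold Spec_can_split_versions_with_combo; infer_instance

-- ===== CLAIM (what is proved, stated in full; the proofs are below) =====
def Claim_equal_can_split_versions_with_combo : Prop := ∀ (pkg_status : List (Option String × List (List (String × String)))) (combo : List String), Dom_can_split_versions_with_combo pkg_status combo → Pre_can_split_versions_with_combo pkg_status combo → Spec_can_split_versions_with_combo pkg_status combo (can_split_versions_with_combo pkg_status combo)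

-- ===== LEMMAS AND PROOFS =====

-- proof-side helpers: A's two nested loops flattened into ONE loop over the pair list
def pvStep (m : PySem.Dict String (List String)) (p : List String × String) : PySem.Dict String (List String) :=
  m.modify p.2 [] (fun s => PySem.Set.add s (PySem.Str.join "/" p.1))

def pvLoopA : List (List String × String) →
    PySem.Dict (List String) String → PySem.Dict String (List String) →
    Option (PySem.Dict (List String) String × PySem.Dict String (List String))
  | [], lookup, mapping => some (lookup, mapping)
  | p :: rest, lookup, mapping =>
    match lookup.get? p.1 with
    | some v => if v ≠ p.2 then none else pvLoopA rest lookup (pvStep mapping p)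
    | none => pvLoopA rest (lookup.insert p.1 p.2) (pvStep mapping p)

-- the lookup dict never contradicts any pair still to be processed
def pvCompat (lookup : PySem.Dict (List String) String) (pairs : List (List String × String)) : Prop :=
  ∀ p ∈ pairs, ∀ v, lookup.get? p.1 = some v → v = p.2

-- the pair list is functional in its first component (= "even split")
def pvFunc (pairs : List (List String × String)) : Prop :=
  ∀ p ∈ pairs, ∀ q ∈ pairs, p.1 = q.1 → p.2 = q.2

theorem pvInnerA_eq_loop (version : String) (combo : List String)
    (keys : List (List (String × String)))
    (lookup : PySem.Dict (List String) String) (mapping : PySem.Dict String (List String)) :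
    pvInnerA version combo keys lookup mapping
      = pvLoopA (keys.map (fun key => (pvNewKeyA key combo, version))) lookup mapping := by
  induction keys generalizing lookup mapping with
  | nil => rfl
  | cons key rest ih =>
    simp only [pvInnerA, List.map_cons, pvLoopA]
    cases lookup.get? (pvNewKeyA key combo) with
    | some v =>
      by_cases hv : v = version
      · subst hv; simp only [ne_eq, not_true_eq_false, if_false, ih]; rfl
      · simp [hv]
    | none => exact ih _ _

theorem pvLoopA_append (xs ys : List (List String × String))
    (lookup : PySem.Dict (List String) String) (mapping : PySem.Dict String (List String)) :
    pvLoopA (xs ++ ys) lookup mapping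
      = (pvLoopA xs lookup mapping).bind (fun st => pvLoopA ys st.1 st.2) := by
  induction xs generalizing lookup mapping with
  | nil => rfl
  | cons p rest ih =>
    simp only [List.cons_append, pvLoopA]
    cases lookup.get? p.1 with
    | some v =>
      by_cases hv : v = p.2
      · simp only [hv, ne_eq, not_true_eq_false, if_false, ih]
      · simp [hv]
    | none => exact ih _ _

theorem pvOuterA_eq_loop (combo : List String)
    (pkgs : List (Option String × List (List (String × String))))
    (lookup : PySem.Dict (List String) String) (mapping : PySem.Dict String (List String)) :
    pvOuterA combo pkgs lookup mapping
      = (pvLoopA (pvPairsB pkgs combo) lookup mapping).map Prod.snd := by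
  induction pkgs generalizing lookup mapping with
  | nil => rfl
  | cons p rest ih =>
    obtain ⟨ver?, keys⟩ := p
    cases ver? with
    | none =>
      rw [show pvPairsB ((none, keys) :: rest) combo
          = (keys.map (fun key => (pvNewKeyA key combo, "missing"))) ++ pvPairsB rest combo from rfl,
        pvLoopA_append, ← pvInnerA_eq_loop]
      simp only [pvOuterA]
      cases pvInnerA "missing" combo keys lookup mapping with
      | none => rfl
      | some st => exact ih st.1 st.2
    | some v =>
      rw [show pvPairsB ((some v, keys) :: rest) combo
          = (keys.map (fun key => (pvNewKeyA key combo, v))) ++ pvPairsB rest combo from rfl,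
        pvLoopA_append, ← pvInnerA_eq_loop]
      simp only [pvOuterA]
      cases pvInnerA v combo keys lookup mapping with
      | none => rfl
      | some st => exact ih st.1 st.2

-- if the lookup is compatible and the pairs are functional, the flattened loop succeeds and its
-- mapping component is exactly B's grouping fold
theorem pvLoopA_some (pairs : List (List String × String))
    (lookup : PySem.Dict (List String) String) (mapping : PySem.Dict String (List String))
    (hc : pvCompat lookup pairs) (hf : pvFunc pairs) :
    (pvLoopA pairs lookup mapping).map Prod.snd = some (pairs.foldl pvStep mapping) := by
  induction pairs generalizing lookup mapping with
  | nil => rfl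
  | cons p rest ih =>
    simp only [pvLoopA, List.foldl_cons]
    have hfr : pvFunc rest := fun a ha b hb => hf a (List.mem_cons_of_mem _ ha) b (List.mem_cons_of_mem _ hb)
    cases hget : lookup.get? p.1 with
    | some v =>
      have hv : v = p.2 := hc p (List.mem_cons_self) v hget
      subst hv
      simp only [ne_eq, not_true_eq_false, if_false]
      exact ih lookup (pvStep mapping p)
        (fun a ha w hw => hc a (List.mem_cons_of_mem _ ha) w hw) hfr
    | none =>
      apply ih _ (pvStep mapping p) _ hfr
      intro a ha w hw
      rw [PySem.Dict.get?_insert] at hw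
      by_cases hk : a.1 = p.1
      · rw [if_pos hk] at hw
        injection hw with hw
        subst hw
        exact hf p List.mem_cons_self a (List.mem_cons_of_mem _ ha) hk.symm
      · rw [if_neg hk] at hw
        exact hc a (List.mem_cons_of_mem _ ha) w hw
    
-- if compatibility or functionality fails, the flattened loop returns None
theorem pvLoopA_none (pairs : List (List String × String))
    (lookup : PySem.Dict (List String) String) (mapping : PySem.Dict String (List String))
    (h : ¬ (pvCompat lookup pairs ∧ pvFunc pairs)) :
    pvLoopA pairs lookup mapping = none := by
  induction pairs generalizing lookup mapping with
  | nil => exact absurd ⟨fun a ha => absurd ha (List.not_mem_nil), fun a ha => absurd ha (List.not_mem_nil)⟩ h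
  | cons p rest ih =>
    simp only [pvLoopA]
    cases hget : lookup.get? p.1 with
    | some v =>
      by_cases hv : v = p.2
      · subst hv
        simp only [ne_eq, not_true_eq_false, if_false]
        apply ih
        intro ⟨hc, hf⟩
        apply h
        constructor
        · intro a ha w hw
          rcases List.mem_cons.mp ha with h1 | ha'
          · rw [h1] at hw ⊢
            rw [hget] at hw
            injection hw with hw'
            exact hw'.symm
          · exact hc a ha' w hw
        · intro a ha b hb hab
          rcases List.mem_cons.mp ha with h1 | ha' <;> rcases List.mem_cons.mp hb with h2 | hb'
          · rw [h1, h2]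
          · rw [h1]
            exact hc b hb' p.2 (by rw [← hab, h1]; exact hget)
          · rw [h2]
            exact (hc a ha' p.2 (by rw [hab, h2]; exact hget)).symm
          · exact hf a ha' b hb' hab
      · simp [hv]
    | none =>
      apply ih
      intro ⟨hc, hf⟩
      apply h
      constructor
      · intro a ha w hw
        rcases List.mem_cons.mp ha with h1 | ha'
        · rw [h1] at hw
          rw [hget] at hw
          cases hw
        · have hw' : (lookup.insert p.1 p.2).get? a.1 = some w := by
            rw [PySem.Dict.get?_insert]
            by_cases hk : a.1 = p.1
            · rw [hk, hget] at hw; cases hw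
            · rw [if_neg hk]; exact hw
          exact hc a ha' w hw'
      · intro a ha b hb hab
        rcases List.mem_cons.mp ha with h1 | ha' <;> rcases List.mem_cons.mp hb with h2 | hb'
        · rw [h1, h2]
        · rw [h1]
          have hthis : (lookup.insert p.1 p.2).get? b.1 = some p.2 := by
            rw [PySem.Dict.get?_insert, if_pos (by rw [← hab, h1])]
          exact hc b hb' p.2 hthis
        · rw [h2]
          have hthis : (lookup.insert p.1 p.2).get? a.1 = some p.2 := by
            rw [PySem.Dict.get?_insert, if_pos (by rw [hab, h2])]
          exact (hc a ha' p.2 hthis).symm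
        · exact hf a ha' b hb' hab

-- |set(xs)| as a Finset cardinality
theorem pvLen_ofList {α : Type} [BEq α] [LawfulBEq α] [DecidableEq α] (l : List α) :
    (PySem.Set.ofList l).length = l.toFinset.card := by
  have hmem : (PySem.Set.ofList l).toFinset = l.toFinset := by
    apply Finset.ext
    intro x
    simp [List.mem_toFinset, PySem.Set.mem_ofList]
  rw [← hmem]
  exact (List.toFinset_card_of_nodup (PySem.Set.nodup_ofList l)).symm

-- B's distinct-count test decides exactly functionality of the pair list
theorem pvCount_iff (pairs : List (List String × String)) :
    ((PySem.Set.ofList (pairs.map Prod.fst)).length = (PySem.Set.ofList pairs).length)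
      ↔ pvFunc pairs := by
  rw [pvLen_ofList, pvLen_ofList]
  have himg : (pairs.map Prod.fst).toFinset = pairs.toFinset.image Prod.fst := by
    apply Finset.ext
    intro x
    simp [List.mem_toFinset, Finset.mem_image, List.mem_map]
  rw [himg, Finset.card_image_iff]
  constructor
  · intro hinj a ha b hb hab
    have : a = b := hinj (List.mem_toFinset.mpr ha) (List.mem_toFinset.mpr hb) hab
    rw [this]
  · intro hf a ha b hb hab
    exact Prod.ext hab (hf a (List.mem_toFinset.mp ha) b (List.mem_toFinset.mp hb) hab)

-- ===== VERDICT (by name: the statement is the Claim_ definition above) =====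
theorem can_split_versions_with_combo_spec : Claim_equal_can_split_versions_with_combo := by
  intro pkg_status combo _ _
  unfold Spec_can_split_versions_with_combo
  simp only [can_split_versions_with_combo, can_split_versions_with_combo_alt]
  rw [pvOuterA_eq_loop]
  by_cases hf : pvFunc (pvPairsB pkg_status combo)
  · rw [if_neg (not_not_intro ((pvCount_iff _).mpr hf))]
    have hc : pvCompat PySem.Dict.empty (pvPairsB pkg_status combo) := by
      intro a _ v hv
      rw [PySem.Dict.get?_empty] at hv
      cases hv
    rw [pvLoopA_some _ _ _ hc hf]
    rfl
  · rw [if_pos (fun h => hf ((pvCount_iff _).mp h))]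
    rw [pvLoopA_none _ _ _ (fun h => hf h.2)]
    rfl
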